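-- pv_equiv track=rewrite | github.com/jonntd/web-302-115-simple-docker | web_115_302_simple.py | acc_step
-- ===== SOURCE A (Python) =====
-- from collections.abc import Iterable, Iterator, MutableMapping
--
-- def acc_step(
--     start: int,
--     stop: None | int = None,
--     step: int = 1,
-- ) -> Iterator[tuple[int, int, int]]:
--     if stop is None:
--         start, stop = 0, start
--     for i in range(start + step, stop, step):
--         yield start, (start := i), step
--     if start != stop:
--         yield start, stop, stop - start
-- ===== SOURCE B (Python) =====
-- def acc_step(start, stop=None, step=1):
--     if stop is None:
--         start, stop = 0, start
--     # closed-form: n = len(range(start, stop, step)) = max(0, ceil((stop-start)/step))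
--     n = max(0, -(-(stop - start) // step))
--     m = max(n - 1, 0)
--     # the k-th segment is pure arithmetic in k; no running accumulator
--     for k in range(m):
--         yield start + k * step, start + (k + 1) * step, step
--     last = start + m * step
--     if last != stop:
--         yield last, stop, stop - last
-- ===== Notes on version B (the rewrite author's own statement) =====
-- stated objective: alternative
-- what changed: B computes the number of range boundaries in closed form with ceiling division, then emits the k-th segment by pure index arithmetic (start + k*step, start + (k+1)*step), replacing A's single pass that threads a running 'start' through the range with a walrus assignment.
import Mathlib
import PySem

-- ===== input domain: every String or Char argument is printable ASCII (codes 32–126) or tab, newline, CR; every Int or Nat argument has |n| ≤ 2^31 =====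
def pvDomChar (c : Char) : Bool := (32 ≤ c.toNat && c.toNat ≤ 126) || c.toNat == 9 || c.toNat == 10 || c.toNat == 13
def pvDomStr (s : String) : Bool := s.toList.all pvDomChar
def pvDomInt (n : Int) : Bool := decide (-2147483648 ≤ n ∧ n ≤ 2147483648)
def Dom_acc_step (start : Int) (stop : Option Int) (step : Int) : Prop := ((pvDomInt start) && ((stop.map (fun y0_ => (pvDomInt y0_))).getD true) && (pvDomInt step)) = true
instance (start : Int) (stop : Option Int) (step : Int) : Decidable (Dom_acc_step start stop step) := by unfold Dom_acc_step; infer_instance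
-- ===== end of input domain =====

-- B replaces A's running walrus pass with a closed-form ceiling-division count and pure
-- index arithmetic for the k-th segment; objective: alternative decomposition, same cost.
-- The generators are compared by the list of yielded tuples.

-- ===== PORT A =====
-- A's generator, transliterated: normalize (start, stop), fold the walrus loop over
-- range(start+step, stop, step) carrying (current start, yielded list), then the tail yield.
def acc_step (start : Int) (stop : Option Int) (step : Int) : List (Int × Int × Int) :=
  let p : Int × Int := match stop with
    | none => (0, start)
    | some v => (start, v)
  let r := (PySem.List.pyRange (p.1 + step) p.2 step).foldl
      (fun (st : Int × List (Int × Int × Int)) i => (i, st.2 ++ [(st.1, i, step)])) (p.1, [])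
  if r.1 ≠ p.2 then r.2 ++ [(r.1, p.2, p.2 - r.1)] else r.2

-- ===== PORT B =====
-- B: n = max(0, ceil((stop-start)/step)) boundaries in closed form (ceil via -((-d)//step)),
-- m = max(n-1, 0) full segments; the k-th segment is pure arithmetic in k; then the tail.
def acc_step_alt (start : Int) (stop : Option Int) (step : Int) : List (Int × Int × Int) :=
  let p : Int × Int := match stop with
    | none => (0, start)
    | some v => (start, v)
  let n : Int := max 0 (-(PySem.Int.floordiv (-(p.2 - p.1)) step))
  let m : Int := max (n - 1) 0
  let pairs := (PySem.List.pyRange 0 m 1).map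
      (fun k => (p.1 + k * step, p.1 + (k + 1) * step, step))
  let last := p.1 + m * step
  pairs ++ (if last ≠ p.2 then [(last, p.2, p.2 - last)] else [])

-- ===== PRECONDITION & SPEC =====
-- With step = 0 Python's range raises ValueError when the generator is iterated; A raises there.
def Pre_acc_step (start : Int) (stop : Option Int) (step : Int) : Prop := step ≠ 0
instance (start : Int) (stop : Option Int) (step : Int) : Decidable (Pre_acc_step start stop step) := by unfold Pre_acc_step; infer_instance
def pvWitness_acc_step : Int × Option Int × Int := (5, some 20, 3)

def Spec_acc_step (start : Int) (stop : Option Int) (step : Int) (out : List (Int × Int × Int)) : Prop := out = acc_step_alt start stop step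
instance (start : Int) (stop : Option Int) (step : Int) (out : List (Int × Int × Int)) : Decidable (Spec_acc_step start stop step out) := by unfold Spec_acc_step; infer_instance

-- ===== CLAIM (what is proved, stated in full; the proofs are below) =====
def Claim_equal_acc_step : Prop := ∀ (start : Int) (stop : Option Int) (step : Int), Dom_acc_step start stop step → Pre_acc_step start stop step → Spec_acc_step start stop step (acc_step start stop step)

-- ===== LEMMAS AND PROOFS =====

-- the ceiling count B computes: ceil((sp-st)/s) as -((-(sp-st)) // s)
def cnum (st sp s : Int) : Int := -(PySem.Int.floordiv (-(sp - st)) s)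

-- the loop condition shared by both recurrences: the next boundary is strictly inside
abbrev C (st sp s : Int) : Prop := (0 < s ∧ st + s < sp) ∨ (s < 0 ∧ sp < st + s)

lemma cnum_eq_iff_neg (st sp s q : Int) (hs : s < 0) :
    cnum st sp s = q ↔ (q - 1) * (-s) < -(sp - st) ∧ -(sp - st) ≤ q * (-s) := by
  have h := PySem.Int.floordiv_neg_neg (sp - st) (-s)
  simp only [neg_neg] at h
  unfold cnum
  rw [h]
  have h2 := @PySem.Int.neg_floordiv_neg_eq_iff_of_pos (-(sp - st)) (-s) q (by omega)
  simpa using h2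

lemma cnum_bracket_pos (st sp s : Int) (hs : 0 < s) :
    (cnum st sp s - 1) * s < sp - st ∧ sp - st ≤ cnum st sp s * s :=
  (PySem.Int.neg_floordiv_neg_eq_iff_of_pos hs).mp rfl

lemma cnum_bracket_neg (st sp s : Int) (hs : s < 0) :
    (cnum st sp s - 1) * (-s) < -(sp - st) ∧ -(sp - st) ≤ cnum st sp s * (-s) :=
  (cnum_eq_iff_neg st sp s _ hs).mp rfl

lemma cnum_ge_two (st sp s : Int) (hC : C st sp s) : 2 ≤ cnum st sp s := by
  rcases hC with ⟨hs, hlt⟩ | ⟨hs, hlt⟩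
  · have hb := (cnum_bracket_pos st sp s hs).2
    by_contra hcon
    have : cnum st sp s * s ≤ 1 * s := mul_le_mul_of_nonneg_right (by omega) hs.le
    omega
  · have hb := (cnum_bracket_neg st sp s hs).2
    by_contra hcon
    have : cnum st sp s * (-s) ≤ 1 * (-s) := mul_le_mul_of_nonneg_right (by omega) (by omega)
    omega

lemma cnum_le_one (st sp s : Int) (hs : s ≠ 0) (hC : ¬ C st sp s) : cnum st sp s ≤ 1 := by
  rcases lt_or_gt_of_ne hs with hneg | hpos
  · have hle : st + s ≤ sp := by
      by_contra h; exact hC (Or.inr ⟨hneg, by omega⟩)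
    have hb := (cnum_bracket_neg st sp s hneg).1
    by_contra hcon
    have : 1 * (-s) ≤ (cnum st sp s - 1) * (-s) := mul_le_mul_of_nonneg_right (by omega) (by omega)
    omega
  · have hle : sp ≤ st + s := by
      by_contra h; exact hC (Or.inl ⟨hpos, by omega⟩)
    have hb := (cnum_bracket_pos st sp s hpos).1
    by_contra hcon
    have : 1 * s ≤ (cnum st sp s - 1) * s := mul_le_mul_of_nonneg_right (by omega) hpos.le
    omega

lemma cnum_succ (st sp s : Int) (hC : C st sp s) :
    cnum (st + s) sp s = cnum st sp s - 1 := by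
  rcases hC with ⟨hs, _⟩ | ⟨hs, _⟩
  · have hb := cnum_bracket_pos st sp s hs
    refine (PySem.Int.neg_floordiv_neg_eq_iff_of_pos hs).mpr ⟨?_, ?_⟩
    · have e : (cnum st sp s - 1 - 1) * s = (cnum st sp s - 1) * s - s := by ring
      have e2 : sp - (st + s) = (sp - st) - s := by ring
      omega
    · have e : (cnum st sp s - 1) * s = cnum st sp s * s - s := by ring
      have e2 : sp - (st + s) = (sp - st) - s := by ring
      omega
  · have hb := cnum_bracket_neg st sp s hs
    refine (cnum_eq_iff_neg (st + s) sp s _ hs).mpr ⟨?_, ?_⟩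
    · have e : (cnum st sp s - 1 - 1) * (-s) = (cnum st sp s - 1) * (-s) - (-s) := by ring
      have e2 : -(sp - (st + s)) = -(sp - st) - (-s) := by ring
      omega
    · have e : (cnum st sp s - 1) * (-s) = cnum st sp s * (-s) - (-s) := by ring
      have e2 : -(sp - (st + s)) = -(sp - st) - (-s) := by ring
      omega

-- One step of Python's range as a list: either the first boundary followed by the rest, or empty.
lemma pyRange_cons (a b s : Int) (hs : s ≠ 0) :
    PySem.List.pyRange a b s =
      if (0 < s ∧ a < b) ∨ (s < 0 ∧ b < a) then a :: PySem.List.pyRange (a + s) b s else [] := by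
  have hfun : ((fun k : Nat => a + s * (k : Int)) ∘ Nat.succ) = fun k : Nat => (a + s) + s * (k : Int) := by
    funext k; simp [Function.comp]; ring
  rcases lt_or_gt_of_ne hs with hneg | hpos
  · simp only [PySem.List.pyRange, hs, if_false, if_neg (not_lt.mpr hneg.le)]
    by_cases hab : b < a
    · rw [if_pos hab, if_pos (Or.inr ⟨hneg, hab⟩)]
      have hC : ((a - b + -s - 1) / -s).toNat
          = (if b < a + s then ((a + s - b + -s - 1) / -s).toNat else 0) + 1 := by
        have hposn : (0:Int) < -s := by omega
        by_cases h2 : b < a + s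
        · rw [if_pos h2]
          have e1 : a - b + -s - 1 = (a - b - 1) + 1 * -s := by ring
          have e2 : a + s - b + -s - 1 = a - b - 1 := by ring
          rw [e1, e2, Int.add_mul_ediv_right _ _ (by omega : (-s) ≠ 0)]
          have hnn : 0 ≤ (a - b - 1) / -s := Int.ediv_nonneg (by omega) hposn.le
          omega
        · rw [if_neg h2]
          have e1 : a - b + -s - 1 = (a - b - 1) + 1 * -s := by ring
          rw [e1, Int.add_mul_ediv_right _ _ (by omega : (-s) ≠ 0)]
          have : (a - b - 1) / -s = 0 := Int.ediv_eq_zero_of_lt (by omega) (by omega)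
          omega
      rw [hC, List.range_succ_eq_map]
      simp only [List.map_cons, List.map_map, hfun, Nat.cast_zero, mul_zero, add_zero]
    · rw [if_neg hab, if_neg (by rintro (⟨h1,h2⟩|⟨h1,h2⟩) <;> omega)]
      simp
  · simp only [PySem.List.pyRange, hs, if_false, if_pos hpos]
    by_cases hab : a < b
    · rw [if_pos hab, if_pos (Or.inl ⟨hpos, hab⟩)]
      have hC : ((b - a + s - 1) / s).toNat
          = (if a + s < b then ((b - (a + s) + s - 1) / s).toNat else 0) + 1 := by
        by_cases h2 : a + s < b
        · rw [if_pos h2]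
          have e1 : b - a + s - 1 = (b - a - 1) + 1 * s := by ring
          have e2 : b - (a + s) + s - 1 = b - a - 1 := by ring
          rw [e1, e2, Int.add_mul_ediv_right _ _ hs]
          have hnn : 0 ≤ (b - a - 1) / s := Int.ediv_nonneg (by omega) hpos.le
          omega
        · rw [if_neg h2]
          have e1 : b - a + s - 1 = (b - a - 1) + 1 * s := by ring
          rw [e1, Int.add_mul_ediv_right _ _ hs]
          have : (b - a - 1) / s = 0 := Int.ediv_eq_zero_of_lt (by omega) (by omega)
          omega
      rw [hC, List.range_succ_eq_map]
      simp only [List.map_cons, List.map_map, hfun, Nat.cast_zero, mul_zero, add_zero]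
    · rw [if_neg hab, if_neg (by rintro (⟨h1,h2⟩|⟨h1,h2⟩) <;> omega)]
      simp

-- A's walrus loop over any list l, started at a, yields exactly the consecutive pairs of a :: l
-- and ends with the last element of l (or a).
lemma foldl_walrus (step : Int) (l : List Int) (a : Int) (acc : List (Int × Int × Int)) :
    l.foldl (fun (st : Int × List (Int × Int × Int)) i => (i, st.2 ++ [(st.1, i, step)])) (a, acc)
      = (l.getLast?.getD a, acc ++ ((a :: l).zip l).map (fun q => (q.1, q.2, step))) := by
  induction l generalizing a acc with
  | nil => simp
  | cons i t ih =>
      simp only [List.foldl_cons, ih, List.zip_cons_cons, List.map_cons, List.append_assoc,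
        List.singleton_append, List.getLast?_cons]
      cases t <;> simp

-- A's recurrence: one loop iteration peels the next boundary, else the tail yield.
lemma A_rec (st sp s : Int) (hs : s ≠ 0) :
    acc_step st (some sp) s =
      if C st sp s
      then (st, st + s, s) :: acc_step (st + s) (some sp) s
      else if st ≠ sp then [(st, sp, sp - st)] else [] := by
  simp only [acc_step, foldl_walrus]
  by_cases hC : C st sp s
  · have hCr : (0 < s ∧ st + s < sp) ∨ (s < 0 ∧ sp < st + s) := hC
    have he : PySem.List.pyRange (st + s) sp s
        = (st + s) :: PySem.List.pyRange (st + s + s) sp s := by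
      rw [pyRange_cons (st + s) sp s hs, if_pos hCr]
    rw [if_pos hC, he]
    have hl : ((st + s) :: PySem.List.pyRange (st + s + s) sp s).getLast?.getD st
        = (PySem.List.pyRange (st + s + s) sp s).getLast?.getD (st + s) := by
      simp [List.getLast?_cons]
    simp only [List.zip_cons_cons, List.map_cons, hl]
    split_ifs <;> simp
  · have hCr : ¬ ((0 < s ∧ st + s < sp) ∨ (s < 0 ∧ sp < st + s)) := hC
    have he : PySem.List.pyRange (st + s) sp s = [] := by
      rw [pyRange_cons (st + s) sp s hs, if_neg hCr]
    rw [if_neg hC, he]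
    simp

-- B's recurrence: the same unfolding, derived from the ceiling-count arithmetic.
lemma B_rec (st sp s : Int) (hs : s ≠ 0) :
    acc_step_alt st (some sp) s =
      if C st sp s
      then (st, st + s, s) :: acc_step_alt (st + s) (some sp) s
      else if st ≠ sp then [(st, sp, sp - st)] else [] := by
  simp only [acc_step_alt]
  have hc : -(PySem.Int.floordiv (-(sp - st)) s) = cnum st sp s := rfl
  have hc' : -(PySem.Int.floordiv (-(sp - (st + s))) s) = cnum (st + s) sp s := rfl
  rw [hc, hc']
  by_cases hC : C st sp s
  · rw [if_pos hC]
    have h2 := cnum_ge_two st sp s hC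
    have hsu := cnum_succ st sp s hC
    rw [hsu]
    have hm1 : max (max 0 (cnum st sp s) - 1) 0 = cnum st sp s - 1 := by omega
    have hm2 : max (max 0 (cnum st sp s - 1) - 1) 0 = cnum st sp s - 2 := by omega
    rw [hm1, hm2]
    rw [PySem.List.pyRange_one 0 (cnum st sp s - 1), PySem.List.pyRange_one 0 (cnum st sp s - 2)]
    have hN : (cnum st sp s - 1 - 0).toNat = (cnum st sp s - 2 - 0).toNat + 1 := by omega
    rw [hN, List.range_succ_eq_map]
    simp only [List.map_cons, List.map_map]
    have hfun : (fun k : Int => (st + k * s, st + (k + 1) * s, s)) ∘ ((fun k : Nat => 0 + (k : Int)) ∘ Nat.succ)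
        = (fun k : Int => (st + s + k * s, st + s + (k + 1) * s, s)) ∘ fun k : Nat => 0 + (k : Int) := by
      funext k
      simp only [Function.comp, Nat.succ_eq_add_one, Prod.mk.injEq]
      push_cast
      refine ⟨by ring, by ring, trivial⟩
    rw [hfun]
    have htail : st + (cnum st sp s - 1) * s = st + s + (cnum st sp s - 2) * s := by ring
    rw [htail]
    simp only [List.cons_append, Nat.cast_zero]
    norm_num
  · rw [if_neg hC]
    have h1 := cnum_le_one st sp s hs hC
    have hm : max (max 0 (cnum st sp s) - 1) 0 = 0 := by omega
    rw [hm]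
    rw [PySem.List.pyRange_one 0 0]
    norm_num

-- A = B at stop = some sp, by induction on the closed-form count.
lemma core (k : Nat) : ∀ st sp s : Int, s ≠ 0 → (cnum st sp s).toNat ≤ k →
    acc_step st (some sp) s = acc_step_alt st (some sp) s := by
  induction k with
  | zero =>
      intro st sp s hs hk
      rw [A_rec st sp s hs, B_rec st sp s hs]
      have hnC : ¬ C st sp s := by
        intro hC
        have := cnum_ge_two st sp s hC
        omega
      rw [if_neg hnC, if_neg hnC]
  | succ k ih =>
      intro st sp s hs hk
      rw [A_rec st sp s hs, B_rec st sp s hs]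
      by_cases hC : C st sp s
      · rw [if_pos hC, if_pos hC]
        have h2 := cnum_ge_two st sp s hC
        have hsu := cnum_succ st sp s hC
        rw [ih (st + s) sp s hs (by omega)]
      · rw [if_neg hC, if_neg hC]

-- ===== VERDICT (by name: the statement is the Claim_ definition above) =====
theorem acc_step_spec : Claim_equal_acc_step := by
  intro start stop step _ hpre
  unfold Spec_acc_step
  cases stop with
  | none =>
      have hA : acc_step start none step = acc_step 0 (some start) step := rfl
      have hB : acc_step_alt start none step = acc_step_alt 0 (some start) step := rfl
      rw [hA, hB]
      exact core (cnum 0 start step).toNat 0 start step hpre le_rfl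
  | some sp => exact core (cnum start sp step).toNat start sp step hpre le_rfl
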